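-- pv_equiv track=rewrite | github.com/junosvv/competitive-programming | atcoder/agc039/c.py | binToInt
-- ===== SOURCE A (Python) =====
-- MOD = 998244353
--
-- def binToInt(x):
--     result = 0
--     t = 1
--     i = 0
--     while i < len(x):
--         if x[~i] == '1':
--             result += t
--             result %= MOD
--         i += 1
--         t *= 2
--         t %= MOD
--     return result
-- ===== SOURCE B (Python) =====
-- MOD = 998244353
--
-- def binToInt(x):
--     result = 0
--     for c in x:
--         result = (result * 2 + (1 if c == '1' else 0)) % MOD
--     return result
-- ===== Notes on version B (the rewrite author's own statement) =====
-- stated objective: idiomatic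
-- what changed: Replaces the right-to-left scan with a separate power-of-two accumulator by a single left-to-right Horner pass with one running accumulator.
import Mathlib
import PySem

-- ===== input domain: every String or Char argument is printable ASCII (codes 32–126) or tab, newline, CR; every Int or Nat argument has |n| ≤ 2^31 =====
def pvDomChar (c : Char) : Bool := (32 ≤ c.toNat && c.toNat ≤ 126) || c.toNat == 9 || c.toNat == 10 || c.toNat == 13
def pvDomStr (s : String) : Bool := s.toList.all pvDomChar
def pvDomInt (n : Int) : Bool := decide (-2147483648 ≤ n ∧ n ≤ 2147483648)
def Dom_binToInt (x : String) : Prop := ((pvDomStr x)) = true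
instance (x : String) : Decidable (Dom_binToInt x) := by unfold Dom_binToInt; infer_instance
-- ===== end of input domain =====

-- B replaces A's right-to-left scan with a power-of-two accumulator by a left-to-right Horner pass (idiomatic, same cost).

def MOD : Int := 998244353

-- ===== PORT A =====
-- one iteration of A's while loop: i-th step reads x[~i] (= x[-i-1])
def binToIntStep (x : String) (st : Int × Int) (i : Int) : Int × Int :=
  let result :=
    match PySem.Str.pyGet? x (-i - 1) with
    | some c => if c = '1' then PySem.Int.mod (st.1 + st.2) MOD else st.1
    | none => st.1  -- unreachable: the loop only visits 0 ≤ i < len(x)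
  (result, PySem.Int.mod (st.2 * 2) MOD)

def binToInt (x : String) : Int :=
  ((PySem.List.pyRange 0 (PySem.Str.len x) 1).foldl (binToIntStep x) (0, 1)).1

-- ===== PORT B =====
def binToInt_alt (x : String) : Int :=
  x.toList.foldl (fun r c => PySem.Int.mod (r * 2 + (if c = '1' then 1 else 0)) MOD) 0

-- ===== PRECONDITION & SPEC =====
def Spec_binToInt (x : String) (out : Int) : Prop := out = binToInt_alt x
instance (x : String) (out : Int) : Decidable (Spec_binToInt x out) := by unfold Spec_binToInt; infer_instance

-- ===== CLAIM (what is proved, stated in full; the proofs are below) =====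
def Claim_equal_binToInt : Prop := ∀ (x : String), Dom_binToInt x → Spec_binToInt x (binToInt x)

-- ===== LEMMAS AND PROOFS =====

-- the exact (unreduced) big-endian value of a bit string
def pvVal (cs : List Char) : Int :=
  cs.foldl (fun a c => 2 * a + (if c = '1' then 1 else 0)) 0

theorem pvModPos : (0:Int) < MOD := by decide

theorem pvMod_eq (a : Int) : PySem.Int.mod a MOD = a % MOD :=
  PySem.Int.mod_eq_emod_of_pos pvModPos

theorem pvModMulRight (X Y P : Int) : (X + Y % MOD * P) % MOD = (X + Y * P) % MOD := by
  conv_lhs => rw [Int.add_emod, Int.mul_emod, Int.emod_emod_of_dvd Y dvd_rfl]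
  rw [← Int.mul_emod, ← Int.add_emod]

theorem pvVal_scale (cs : List Char) (r : Int) :
    cs.foldl (fun a c => 2 * a + (if c = '1' then 1 else 0)) r
      = r * 2 ^ cs.length + pvVal cs := by
  induction cs generalizing r with
  | nil => simp [pvVal]
  | cons c cs ih =>
    simp only [List.foldl_cons, List.length_cons, pvVal]
    rw [ih, ih (2 * 0 + if c = '1' then 1 else 0)]
    ring

theorem pvVal_append_singleton (l : List Char) (c : Char) :
    pvVal (l ++ [c]) = 2 * pvVal l + (if c = '1' then 1 else 0) := by
  simp [pvVal, List.foldl_append]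

-- B's loop computes the value mod MOD (Horner with reduction each step)
theorem pvB_loop (cs : List Char) (r : Int) (h0 : 0 ≤ r) (h1 : r < MOD) :
    cs.foldl (fun a c => (a * 2 + (if c = '1' then 1 else 0)) % MOD) r
      = (r * 2 ^ cs.length + pvVal cs) % MOD := by
  induction cs generalizing r with
  | nil => simpa [pvVal] using (Int.emod_eq_of_lt h0 h1).symm
  | cons c cs ih =>
    simp only [List.foldl_cons]
    rw [ih _ (Int.emod_nonneg _ (by decide)) (Int.emod_lt_of_pos _ pvModPos)]
    have hv : pvVal (c :: cs) = (if c = '1' then (1:Int) else 0) * 2 ^ cs.length + pvVal cs := by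
      have := pvVal_scale cs (2 * 0 + if c = '1' then (1:Int) else 0)
      simp only [pvVal, List.foldl_cons] at *
      rw [this]; ring
    conv_lhs => rw [show ((r * 2 + (if c = '1' then (1:Int) else 0)) % MOD * 2 ^ cs.length + pvVal cs)
        = (pvVal cs + (r * 2 + (if c = '1' then (1:Int) else 0)) % MOD * 2 ^ cs.length) by ring]
    rw [pvModMulRight, hv]
    congr 1
    simp only [List.length_cons]
    ring

-- A's loop invariant: the tail of the range from n-k adds t · value(first k chars)
theorem pvA_loop (x : String) (k : Nat) (r t : Int)
    (hk : k ≤ x.toList.length) (h0 : 0 ≤ r) (h1 : r < MOD) :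
    ((PySem.List.pyRange ((x.toList.length : Int) - k) (x.toList.length : Int) 1).foldl
        (binToIntStep x) (r, t)).1
      = (r + t * pvVal (x.toList.take k)) % MOD := by
  induction k generalizing r t with
  | zero =>
    rw [PySem.List.pyRange_one_eq_nil (by omega)]
    simpa [pvVal] using (Int.emod_eq_of_lt h0 h1).symm
  | succ k ih =>
    have hlen : k + 1 ≤ x.toList.length := hk
    rw [PySem.List.pyRange_one_cons (by omega)]
    simp only [List.foldl_cons]
    push_cast
    have hidx : (-(((x.toList.length : Int) - ((k:Int)+1))) - 1)
        = -((x.toList.length - k : Nat) : Int) := by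
      push_cast [Nat.cast_sub (by omega : k ≤ x.toList.length)]
      ring
    have hget : PySem.Str.pyGet? x (-(((x.toList.length : Int) - ((k:Int)+1))) - 1)
        = some (x.toList[k]'(by omega)) := by
      rw [hidx, PySem.Str.pyGet?_eq, PySem.Chars.pyGet?_eq_listPyGet?,
        PySem.List.pyGet?_neg_natCast x.toList (x.toList.length - k) (by omega) (by omega),
        show x.toList.length - (x.toList.length - k) = k by omega]
      exact List.getElem?_eq_getElem (by omega)
    have hstep : binToIntStep x (r, t) ((x.toList.length : Int) - ((k:Int)+1))
        = (if x.toList[k]'(by omega) = '1' then (r + t) % MOD else r, (t * 2) % MOD) := by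
      simp only [binToIntStep, hget, pvMod_eq]
    have harg : ((x.toList.length : Int) - ((k:Int)+1)) + 1 = (x.toList.length : Int) - k := by
      ring
    rw [hstep, harg]
    have htake : x.toList.take (k+1) = x.toList.take k ++ [x.toList[k]'(by omega)] := by
      rw [List.take_add_one, List.getElem?_eq_getElem (by omega)]
      rfl
    rw [htake, pvVal_append_singleton]
    by_cases hc : x.toList[k]'(by omega) = '1'
    · simp only [hc, if_true]
      rw [ih _ _ (by omega) (Int.emod_nonneg _ (by decide)) (Int.emod_lt_of_pos _ pvModPos)]
      rw [pvModMulRight, Int.emod_add_emod]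
      congr 1
      ring
    · simp only [hc, if_false]
      rw [ih _ _ (by omega) h0 h1]
      rw [pvModMulRight]
      congr 1
      ring

-- ===== VERDICT (by name: the statement is the Claim_ definition above) =====
theorem binToInt_spec : Claim_equal_binToInt := by
  intro x _
  show binToInt x = binToInt_alt x
  have hA := pvA_loop x x.toList.length 0 1 (le_refl _) (le_refl 0) pvModPos
  simp only [sub_self, List.take_length] at hA
  simp only [zero_add, one_mul] at hA
  have hB := pvB_loop x.toList 0 (le_refl 0) pvModPos
  simp only [zero_mul, zero_add] at hB
  rw [binToInt, binToInt_alt]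
  simp only [pvMod_eq]
  have hlen : PySem.Str.len x = (x.toList.length : Int) := by simp [PySem.Str.len_eq]
  rw [hlen, hA, hB]
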